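-- pv_equiv track=rewrite | github.com/first0506/Algorithm-Problem-Solving | 무지의 먹방 라이브_김현준.py | solution
-- ===== SOURCE A (Python) =====
-- def solution(food_times, k):
--     answer = -1
--     food_sort = [(i[0]+1, i[1]) for i in sorted(enumerate(food_times), key = lambda x : x[1])]  # 음식 먹는데 필요한 시간순으로 정렬(이 때 음식의 번호또한 저장)
--     leftdish = len(food_times)  # 회전판에 남아있는 음식 수
--     endtime = 0 # 모두 먹는데 필요한 시간
--     for i in range(len(food_sort)):
--         if not i:   # 음식 먹는데 필요한 시간이 가장 짧은 음식일 때
--             tmp = endtime + food_sort[i][1] * leftdish  #tmp = i 번째 음식을 다 먹는 턴이 끝나는 시간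
--         else:
--             tmp = endtime + (food_sort[i][1]-food_sort[i-1][1]) * leftdish
--         if k < tmp: # 턴이 끝나는 시간이 k보다 크면
--             pan = food_sort[i::]    # pan = 회전판에 있는 음식들
--             pan = sorted(pan, key=lambda x : x[0])  # 번호순으로 다시 정렬
--             answer = pan[(k-endtime)%leftdish][0]   # i-1 번째 음식을 다 먹는 턴 이후 k초에 먹는 음식 찾기
--             break
--         leftdish -= 1
--         endtime = tmp
--     return answer
-- ===== SOURCE B (Python) =====
-- def solution(food_times, k):
--     # Binary search on the time threshold t (no sorting): S(t) = sum(min(f, t))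
--     # is the number of seconds consumed once every food's first min(f, t) units
--     # are eaten; find the largest t with S(t) <= k, then the answer is the
--     # (k - S(t))-th food (by original order) among those with f > t.
--     n = len(food_times)
--     if n == 0:
--         return -1
--     total = sum(food_times)
--     if k >= total:
--         return -1
--     lo = min(min(food_times) - 1, k // n)   # S(lo) <= k
--     hi = max(food_times)                    # S(hi) = total > k
--     while lo + 1 < hi:
--         mid = (lo + hi) // 2
--         if sum(min(f, mid) for f in food_times) <= k:
--             lo = mid
--         else:
--             hi = mid
--     elapsed = sum(min(f, lo) for f in food_times)
--     survivors = [i + 1 for i, f in enumerate(food_times) if f > lo]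
--     return survivors[k - elapsed]
-- ===== Notes on version B (the rewrite author's own statement) =====
-- stated objective: alternative
-- what changed: B never sorts: it binary-searches the largest threshold t with sum(min(f,t)) <= k (the seconds consumed once every food's first min(f,t) units are eaten), then reads the answer as the (k - sum(min(f,t)))-th food, in original order, among those with f > t; A instead sorts (value, index) pairs and scans accumulated time blocks.
import Mathlib
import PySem

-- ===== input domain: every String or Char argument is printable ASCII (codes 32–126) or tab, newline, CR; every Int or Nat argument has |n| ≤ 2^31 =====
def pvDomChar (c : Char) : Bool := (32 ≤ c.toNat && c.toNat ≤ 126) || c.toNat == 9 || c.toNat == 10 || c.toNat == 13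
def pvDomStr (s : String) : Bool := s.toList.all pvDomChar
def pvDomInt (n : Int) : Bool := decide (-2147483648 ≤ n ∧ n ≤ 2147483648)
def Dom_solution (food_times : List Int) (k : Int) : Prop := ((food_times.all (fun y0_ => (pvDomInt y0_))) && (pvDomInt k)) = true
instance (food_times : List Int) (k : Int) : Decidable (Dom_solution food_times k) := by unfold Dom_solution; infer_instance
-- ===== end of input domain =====

-- B drops A's sort-and-scan entirely: it binary-searches the largest threshold t with
-- sum(min(f,t)) <= k and reads the answer off the foods with f > t (objective: alternative).

-- ===== PORT A =====
-- A's for-loop with break, as structural recursion on the index i;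
-- `food_sort[i::]` (i ≥ 0) is `List.drop i`; the index `(k-endtime)%leftdish` into
-- `pan` is provably in range, so the `none` (IndexError) branch is unreachable.
def solutionLoop (food_sort : List (Int × Int)) (k : Int) (i : Nat) (leftdish endtime : Int) : Int :=
  if h : i < food_sort.length then
    let tmp := if i = 0 then endtime + food_sort[i].2 * leftdish
               else endtime + (food_sort[i].2 - (food_sort[i-1]'(by omega)).2) * leftdish
    if k < tmp then
      let pan := PySem.List.sorted (food_sort.drop i) (fun x => x.1) false
      match PySem.List.pyGet? pan (PySem.Int.mod (k - endtime) leftdish) with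
      | some p => p.1
      | none => -1   -- unreachable: index provably in [0, leftdish)
    else solutionLoop food_sort k (i+1) (leftdish - 1) tmp
  else -1
termination_by food_sort.length - i
decreasing_by exact Nat.sub_succ_lt_self _ _ h

def solution (food_times : List Int) (k : Int) : Int :=
  let food_sort := (PySem.List.sorted (PySem.List.enumerate food_times 0) (fun x => x.2) false).map
    (fun p => (p.1 + 1, p.2))
  solutionLoop food_sort k 0 (food_times.length : Int) 0

-- ===== PORT B =====
-- B's while-loop: binary search on the interval (lo, hi), invariant S(lo) ≤ k < S(hi)
-- where S(t) = sum(min(f, t)); Python's `mid = (lo+hi)//2` is floor division.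
def bsearchLoop (food_times : List Int) (k lo hi : Int) : Int :=
  if h : lo + 1 < hi then
    if (food_times.map (fun f => min f (PySem.Int.floordiv (lo + hi) 2))).sum ≤ k then
      bsearchLoop food_times k (PySem.Int.floordiv (lo + hi) 2) hi
    else
      bsearchLoop food_times k lo (PySem.Int.floordiv (lo + hi) 2)
  else lo
termination_by (hi - lo).toNat
decreasing_by
  all_goals
    have hb := PySem.Int.floordiv_two_mid_bounds (show lo + 1 ≤ hi - 1 by omega)
    rw [show lo + 1 + (hi - 1) = lo + hi by ring] at hb
    omega

-- min(food_times)/max(food_times) are matched on; the list is nonempty there, so the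
-- `none` branches are unreachable, as is the IndexError branch of the final indexing.
def solution_alt (food_times : List Int) (k : Int) : Int :=
  if food_times.length = 0 then -1
  else
    let total := food_times.sum
    if total ≤ k then -1   -- Python: k >= total
    else
      match PySem.List.min? food_times (fun x => x), PySem.List.max? food_times (fun x => x) with
      | some mn, some mx =>
        let lo := min (mn - 1) (PySem.Int.floordiv k (food_times.length : Int))
        let t := bsearchLoop food_times k lo mx
        let elapsed := (food_times.map (fun f => min f t)).sum
        let survivors := (PySem.List.enumerate food_times 0).filterMap
          (fun p => if t < p.2 then some (p.1 + 1) else none)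
        match PySem.List.pyGet? survivors (k - elapsed) with
        | some a => a
        | none => -1   -- unreachable: index provably in range
      | _, _ => -1     -- unreachable: the list is nonempty here

-- ===== PRECONDITION & SPEC =====
def Spec_solution (food_times : List Int) (k : Int) (out : Int) : Prop := out = solution_alt food_times k
instance (food_times : List Int) (k : Int) (out : Int) : Decidable (Spec_solution food_times k out) := by unfold Spec_solution; infer_instance

-- ===== CLAIM (what is proved, stated in full; the proofs are below) =====
def Claim_equal_solution : Prop := ∀ (food_times : List Int) (k : Int), Dom_solution food_times k → Spec_solution food_times k (solution food_times k)

-- ===== LEMMAS AND PROOFS =====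

-- S(t) = sum(min(f, t)), the seconds consumed once every food's first min(f,t) units are eaten
def Sv (l : List Int) (t : Int) : Int := (l.map (fun f => min f t)).sum

-- the common answer shape both programs reach: index k - S(t) into the foods with f > t
def BAns (ft : List Int) (k t : Int) : Int :=
  match PySem.List.pyGet? ((PySem.List.enumerate ft 0).filterMap
      (fun p => if t < p.2 then some (p.1 + 1) else none)) (k - Sv ft t) with
  | some a => a
  | none => -1

theorem Sv_mono (l : List Int) {t u : Int} (h : t ≤ u) : Sv l t ≤ Sv l u := by
  induction l with
  | nil => simp [Sv]
  | cons a l ih =>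
    simp only [Sv, List.map_cons, List.sum_cons] at *
    have : min a t ≤ min a u := by omega
    omega

theorem Sv_succ (l : List Int) (t : Int) :
    Sv l (t + 1) = Sv l t + (l.countP (fun f => decide (t < f)) : Int) := by
  induction l with
  | nil => simp [Sv]
  | cons a l ih =>
    simp only [Sv, List.map_cons, List.sum_cons, List.countP_cons] at *
    by_cases h : t < a
    · simp only [h, decide_true]
      push_cast
      have h1 : min a (t + 1) = min a t + 1 := by omega
      omega
    · simp only [h, decide_false]
      have h1 : min a (t + 1) = min a t := by omega
      push_cast
      omega

theorem Sv_le_sum (l : List Int) (t : Int) : Sv l t ≤ l.sum := by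
  induction l with
  | nil => simp [Sv]
  | cons a l ih =>
    simp only [Sv, List.map_cons, List.sum_cons] at *
    have : min a t ≤ a := min_le_left _ _
    omega

theorem Sv_all_ge (l : List Int) (t : Int) (h : ∀ f ∈ l, t ≤ f) : Sv l t = t * l.length := by
  induction l with
  | nil => simp [Sv]
  | cons a l ih =>
    simp only [Sv, List.map_cons, List.sum_cons, List.length_cons] at *
    rw [min_eq_right (h a (by simp))]
    rw [ih (fun f hf => h f (by simp [hf]))]
    push_cast; ring

theorem Sv_all_le (l : List Int) (t : Int) (h : ∀ f ∈ l, f ≤ t) : Sv l t = l.sum := by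
  induction l with
  | nil => simp [Sv]
  | cons a l ih =>
    simp only [Sv, List.map_cons, List.sum_cons] at *
    rw [min_eq_left (h a (by simp)), ih (fun f hf => h f (by simp [hf]))]

-- S is affine on a gap of the value spectrum: if the survivor count is constantly r
-- on [a, c), then S(c) = S(a) + (c - a) * r.
theorem Sv_lin (l : List Int) (a c r : Int) (hac : a ≤ c)
    (hr : ∀ x, a ≤ x → x < c → (l.countP (fun f => decide (x < f)) : Int) = r) :
    Sv l c = Sv l a + (c - a) * r := by
  have key : ∀ (m : Nat), ∀ c, c = a + (m : Int) → (∀ x, a ≤ x → x < c →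
      (l.countP (fun f => decide (x < f)) : Int) = r) → Sv l c = Sv l a + (c - a) * r := by
    intro m
    induction m with
    | zero => intro c hc _; simp [hc]
    | succ m ih =>
      intro c hc hr
      have hc1 : c = (a + m) + 1 := by push_cast at hc ⊢; omega
      have h1 : Sv l (a + m) = Sv l a + ((a + m) - a) * r := by
        refine ih (a + m) rfl (fun x hx1 hx2 => hr x hx1 (by push_cast at hc ⊢; omega))
      have h2 := Sv_succ l (a + m)
      have h3 : (l.countP (fun f => decide ((a + (m : Int)) < f)) : Int) = r := by
        refine hr _ (by omega) (by omega)
      rw [hc1, h2, h1, h3]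
      push_cast; ring
  refine key (c - a).toNat c (by omega) hr

-- binary search correctness: from S(lo) ≤ k < S(hi), lo < hi, the loop returns the
-- unique t with S(t) ≤ k < S(t+1)
theorem bsearch_spec (l : List Int) (k : Int) :
    ∀ (fuel : Nat) (lo hi : Int), (hi - lo).toNat ≤ fuel → lo < hi →
      Sv l lo ≤ k → k < Sv l hi →
      Sv l (bsearchLoop l k lo hi) ≤ k ∧ k < Sv l (bsearchLoop l k lo hi + 1) := by
  intro fuel
  induction fuel with
  | zero => intro lo hi h1 h2 _ _; omega
  | succ fuel ih =>
    intro lo hi hfuel hlt hlo hhi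
    rw [bsearchLoop]
    by_cases h : lo + 1 < hi
    · rw [dif_pos h]
      have hb := PySem.Int.floordiv_two_mid_bounds (show lo + 1 ≤ hi - 1 by omega)
      rw [show lo + 1 + (hi - 1) = lo + hi by ring] at hb
      by_cases hc : (l.map (fun f => min f (PySem.Int.floordiv (lo + hi) 2))).sum ≤ k
      · rw [if_pos hc]
        exact ih _ _ (by omega) (by omega) hc hhi
      · rw [if_neg hc]
        exact ih _ _ (by omega) (by omega) hlo (by exact lt_of_not_ge hc)
    · rw [dif_neg h]
      have : hi = lo + 1 := by omega
      exact ⟨hlo, this ▸ hhi⟩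

theorem pyGet?_map {α β : Type} (f : α → β) (xs : List α) (i : Int) :
    PySem.List.pyGet? (xs.map f) i = (PySem.List.pyGet? xs i).map f := by
  simp only [PySem.List.pyGet?, List.length_map]
  cases PySem.List.pyIdx? xs.length i with
  | none => rfl
  | some k => simp [List.getElem?_map]

theorem filterMap_if_eq_filter_map {α β : Type} (l : List α) (c : α → Prop) [DecidablePred c]
    (f : α → β) :
    l.filterMap (fun x => if c x then some (f x) else none)
      = (l.filter (fun x => decide (c x))).map f := by
  induction l with
  | nil => rfl
  | cons a l ih => by_cases h : c a <;> simp [h, ih]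

-- inserting an element whose .1 exceeds every .1 in a lex-sorted accumulator keeps it lex-sorted
theorem insertBy_stable (x : Int × Int) (acc : List (Int × Int))
    (hacc : acc.Pairwise (fun p q => p.2 < q.2 ∨ (p.2 = q.2 ∧ p.1 < q.1)))
    (hlt : ∀ a ∈ acc, a.1 < x.1) :
    (PySem.List.insertBy (fun a b => decide (a.2 < b.2)) x acc).Pairwise
      (fun p q => p.2 < q.2 ∨ (p.2 = q.2 ∧ p.1 < q.1)) := by
  induction acc with
  | nil => simp [PySem.List.insertBy]
  | cons y ys ih =>
    rw [PySem.List.insertBy]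
    by_cases hb : x.2 < y.2
    · simp only [hb, decide_true, if_true]
      constructor
      · intro z hz
        rcases List.mem_cons.mp hz with rfl | hz
        · exact Or.inl hb
        · rcases List.rel_of_pairwise_cons hacc hz with h | ⟨h1, h2⟩
          · exact Or.inl (lt_trans hb h)
          · exact Or.inl (lt_of_lt_of_le hb (le_of_eq h1))
      · exact hacc
    · simp only [hb, decide_false, Bool.false_eq_true, if_false]
      constructor
      · intro z hz
        rw [PySem.List.insertBy_mem_iff] at hz
        rcases hz with rfl | hz
        · rcases eq_or_lt_of_le (not_lt.mp hb) with he | hl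
          · exact Or.inr ⟨he, hlt y (by simp)⟩
          · exact Or.inl hl
        · exact List.rel_of_pairwise_cons hacc hz
      · exact ih (List.pairwise_cons.mp hacc).2 (fun a ha => hlt a (by simp [ha]))

-- stability of A's key-sort: on a list strictly increasing in .1, sorting by .2
-- yields a list strictly increasing in the lexicographic order (.2, .1).
theorem sorted_snd_stable (xs : List (Int × Int))
    (hx : xs.Pairwise (fun p q => p.1 < q.1)) :
    (PySem.List.sorted xs (fun x => x.2) false).Pairwise
      (fun p q => p.2 < q.2 ∨ (p.2 = q.2 ∧ p.1 < q.1)) := by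
  show (xs.foldl (fun acc x => PySem.List.insertBy (fun a b => decide (a.2 < b.2)) x acc) []).Pairwise _
  suffices h : ∀ (l acc : List (Int × Int)),
      l.Pairwise (fun p q => p.1 < q.1) →
      acc.Pairwise (fun p q => p.2 < q.2 ∨ (p.2 = q.2 ∧ p.1 < q.1)) →
      (∀ a ∈ acc, ∀ b ∈ l, a.1 < b.1) →
      (l.foldl (fun acc x => PySem.List.insertBy (fun a b => decide (a.2 < b.2)) x acc) acc).Pairwise
        (fun p q => p.2 < q.2 ∨ (p.2 = q.2 ∧ p.1 < q.1)) by
    exact h xs [] hx (by simp) (by simp)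
  intro l
  induction l with
  | nil => intro acc _ h2 _; simpa using h2
  | cons x t ih =>
    intro acc h1 h2 h3
    simp only [List.foldl_cons]
    refine ih _ (List.pairwise_cons.mp h1).2 ?_ ?_
    · exact insertBy_stable x acc h2 (fun a ha => h3 a ha x (by simp))
    · intro a ha b hb
      rw [PySem.List.insertBy_mem_iff] at ha
      rcases ha with rfl | ha
      · exact (List.pairwise_cons.mp h1).1 b hb
      · exact h3 a ha b (by simp [hb])

-- in a list nondecreasing in value, with everything before i at most x and everything
-- from i on above x, the elements above x are exactly the suffix from i
theorem filter_val_eq_drop (fs : List (Int × Int)) (i : Nat) (hi : i ≤ fs.length) (x : Int)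
    (hlow : ∀ j (h : j < i), (fs[j]'(by omega)).2 ≤ x)
    (hhigh : ∀ j (h : j < fs.length), i ≤ j → x < (fs[j]'h).2) :
    fs.filter (fun e => decide (x < e.2)) = fs.drop i := by
  conv_lhs => rw [← List.take_append_drop i fs]
  rw [List.filter_append]
  have htake : (fs.take i).filter (fun e => decide (x < e.2)) = [] := by
    rw [List.filter_eq_nil_iff]
    intro a ha
    rcases List.mem_take_iff_getElem.mp ha with ⟨j, hj, rfl⟩
    have hji : j < i := lt_of_lt_of_le hj (min_le_left _ _)
    have := hlow j hji
    simp only [decide_eq_true_eq]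
    omega
  have hdrop : (fs.drop i).filter (fun e => decide (x < e.2)) = fs.drop i := by
    rw [List.filter_eq_self]
    intro a ha
    rcases List.mem_drop_iff_getElem.mp ha with ⟨j, hj, rfl⟩
    simp only [decide_eq_true_eq]
    exact hhigh (i + j) (by omega) (by omega)
  rw [htake, hdrop, List.nil_append]

-- count of survivors above x, read through the partition position i of the sorted list
theorem countP_gt (ft : List Int) (fs : List (Int × Int))
    (hperm : fs.Perm (PySem.List.enumerate ft 0)) (i : Nat) (hi : i ≤ fs.length) (x : Int)
    (hlow : ∀ j (h : j < i), (fs[j]'(by omega)).2 ≤ x)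
    (hhigh : ∀ j (h : j < fs.length), i ≤ j → x < (fs[j]'h).2) :
    (ft.countP (fun f => decide (x < f)) : Int) = (fs.length : Int) - i := by
  have h1 : ft.countP (fun f => decide (x < f))
      = (PySem.List.enumerate ft 0).countP (fun p => decide (x < p.2)) := by
    conv_lhs => rw [← PySem.List.map_snd_enumerate ft 0]
    rw [List.countP_map]
    rfl
  rw [h1, ← hperm.countP_eq, List.countP_eq_length_filter, filter_val_eq_drop fs i hi x hlow hhigh,
    List.length_drop]
  omega

-- values along the stably sorted list are nondecreasing
theorem fs_val_mono (fs : List (Int × Int))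
    (hpair : fs.Pairwise (fun p q => p.2 < q.2 ∨ (p.2 = q.2 ∧ p.1 < q.1)))
    {j1 j2 : Nat} (h : j1 ≤ j2) (h2 : j2 < fs.length) :
    (fs[j1]'(lt_of_le_of_lt h h2)).2 ≤ (fs[j2]'h2).2 := by
  rcases eq_or_lt_of_le h with rfl | hlt
  · exact le_refl _
  · rcases (List.pairwise_iff_getElem.mp hpair) j1 j2 (lt_of_le_of_lt h h2) h2 hlt with h' | ⟨h', _⟩
    · exact le_of_lt h'
    · exact le_of_eq h'

-- every food value occurs somewhere in the sorted pair list
theorem mem_ft_val (ft : List Int) (fs : List (Int × Int))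
    (hperm : fs.Perm (PySem.List.enumerate ft 0)) {f : Int} (hf : f ∈ ft) :
    ∃ j, ∃ h : j < fs.length, (fs[j]'h).2 = f := by
  have h1 : f ∈ fs.map (fun p => p.2) := by
    rw [(hperm.map (fun p => p.2)).mem_iff]
    rw [show (PySem.List.enumerate ft 0).map (fun p => p.2)
        = (PySem.List.enumerate ft 0).map (·.2) from rfl, PySem.List.map_snd_enumerate]
    exact hf
  rcases List.mem_map.mp h1 with ⟨p, hp, rfl⟩
  rcases List.getElem_of_mem hp with ⟨j, hj, rfl⟩
  exact ⟨j, hj, rfl⟩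

-- A's `tmp` at step i is S(v_i), by telescoping through the invariant
theorem tmp_eq (ft : List Int) (k : Int) (fs : List (Int × Int))
    (hperm : fs.Perm (PySem.List.enumerate ft 0))
    (hpair : fs.Pairwise (fun p q => p.2 < q.2 ∨ (p.2 = q.2 ∧ p.1 < q.1)))
    (i : Nat) (h : i < fs.length) (endtime : Int)
    (hinv : (i = 0 ∧ endtime = 0) ∨
      (∃ h1 : i - 1 < fs.length, 0 < i ∧ endtime = Sv ft ((fs[i-1]'h1).2))) :
    (if i = 0 then endtime + (fs[i]'h).2 * ((fs.length : Int) - i)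
     else endtime + ((fs[i]'h).2 - ((fs[i-1]'(by omega)).2)) * ((fs.length : Int) - i))
      = Sv ft ((fs[i]'h).2) := by
  rcases hinv with ⟨rfl, rfl⟩ | ⟨h1, hpos, he⟩
  · rw [if_pos rfl]
    have hall : ∀ f ∈ ft, (fs[0]'h).2 ≤ f := by
      intro f hf
      rcases mem_ft_val ft fs hperm hf with ⟨j, hj, rfl⟩
      exact fs_val_mono fs hpair (Nat.zero_le j) hj
    have hlen : fs.length = ft.length := by
      simpa [PySem.List.length_enumerate] using hperm.length_eq
    rw [Sv_all_ge ft _ hall, ← hlen]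
    push_cast; ring
  · rw [if_neg (by omega), he]
    have hprev_le : (fs[i-1]'h1).2 ≤ (fs[i]'h).2 := fs_val_mono fs hpair (by omega) h
    have hcount : ∀ x, (fs[i-1]'h1).2 ≤ x → x < (fs[i]'h).2 →
        (ft.countP (fun f => decide (x < f)) : Int) = (fs.length : Int) - i := by
      intro x hx1 hx2
      refine countP_gt ft fs hperm i (by omega) x ?_ ?_
      · intro j hj
        exact le_trans (fs_val_mono fs hpair (by omega) h1) hx1
      · intro j hj hij
        exact lt_of_lt_of_le hx2 (fs_val_mono fs hpair hij hj)
    rw [Sv_lin ft _ _ _ hprev_le hcount]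

-- A's loop from the break-relevant state: given the unique threshold t, the loop breaks
-- and returns the common answer BAns
theorem A_loop_eq (ft : List Int) (k : Int) (fs : List (Int × Int))
    (hperm : fs.Perm (PySem.List.enumerate ft 0))
    (hpair : fs.Pairwise (fun p q => p.2 < q.2 ∨ (p.2 = q.2 ∧ p.1 < q.1)))
    (t : Int) (ht1 : Sv ft t ≤ k) (ht2 : k < Sv ft (t + 1)) :
    ∀ (i : Nat) (endtime : Int), i ≤ fs.length →
      ((i = 0 ∧ endtime = 0) ∨
        (∃ h : i - 1 < fs.length, 0 < i ∧ endtime = Sv ft ((fs[i-1]'h).2) ∧ (fs[i-1]'h).2 ≤ t ∧ endtime ≤ k)) →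
      solutionLoop (fs.map (fun p => (p.1 + 1, p.2))) k i ((fs.length : Int) - i) endtime
        = BAns ft k t := by
  suffices main : ∀ (fuel i : Nat) (endtime : Int), fs.length - i ≤ fuel → i ≤ fs.length →
      ((i = 0 ∧ endtime = 0) ∨
        (∃ h : i - 1 < fs.length, 0 < i ∧ endtime = Sv ft ((fs[i-1]'h).2) ∧ (fs[i-1]'h).2 ≤ t ∧ endtime ≤ k)) →
      solutionLoop (fs.map (fun p => (p.1 + 1, p.2))) k i ((fs.length : Int) - i) endtime
        = BAns ft k t by
    intro i endtime h1 h2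
    exact main (fs.length - i) i endtime le_rfl h1 h2
  intro fuel
  induction fuel with
  | zero =>
    intro i endtime hfuel hile hinv
    -- i = fs.length: the loop would end; contradiction with k < S(t+1) ≤ total ≤ k
    exfalso
    have hi : i = fs.length := by omega
    rcases hinv with ⟨rfl, _⟩ | ⟨h1, hpos, he, hle, hek⟩
    · -- fs empty, ft empty: S is constantly 0, contradicting ht1/ht2
      have hft : ft = [] := by
        have := hperm.length_eq
        rw [PySem.List.length_enumerate] at this
        exact List.length_eq_zero_iff.mp (by omega)
      subst hft
      simp [Sv] at ht1 ht2
      omega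
    · have hmax : ∀ f ∈ ft, f ≤ (fs[i-1]'h1).2 := by
        intro f hf
        rcases mem_ft_val ft fs hperm hf with ⟨j, hj, rfl⟩
        exact fs_val_mono fs hpair (by omega) h1
      have hsum : Sv ft ((fs[i-1]'h1).2) = ft.sum := Sv_all_le ft _ hmax
      have h2 : Sv ft (t + 1) ≤ ft.sum := Sv_le_sum ft (t + 1)
      omega
  | succ fuel ih =>
    intro i endtime hfuel hile hinv
    by_cases hi : i < fs.length
    · rw [solutionLoop]
      rw [dif_pos (by simpa using hi)]
      simp only [List.getElem_map, List.length_map]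
      have htmp := tmp_eq ft k fs hperm hpair i hi endtime
        (by rcases hinv with ⟨a, b⟩ | ⟨h1, hpos, he, _, _⟩
            · exact Or.inl ⟨a, b⟩
            · exact Or.inr ⟨h1, hpos, he⟩)
      rw [show (if i = 0 then endtime + (fs[i]'hi).2 * ((fs.length : Int) - (i:Int))
          else endtime + ((fs[i]'hi).2 - ((fs[i-1]'(by omega)).2)) * ((fs.length : Int) - (i:Int)))
          = Sv ft ((fs[i]'hi).2) from htmp]
      by_cases hk : k < Sv ft ((fs[i]'hi).2)
      · rw [if_pos hk]
        -- the break step: t lies in [v_{i-1}, v_i) (resp. below v_0)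
        have htvi : t < (fs[i]'hi).2 := by
          by_contra hc
          exact absurd (le_trans (Sv_mono ft (not_lt.mp hc)) ht1) (not_le.mpr hk)
        have hlow : ∀ j (hj : j < i), (fs[j]'(by omega)).2 ≤ t := by
          intro j hj
          rcases hinv with ⟨hz, _⟩ | ⟨h1, hpos, he, hle, _⟩
          · omega
          · exact le_trans (fs_val_mono fs hpair (by omega) h1) hle
        have hhigh : ∀ j (hj : j < fs.length), i ≤ j → t < (fs[j]'hj).2 :=
          fun j hj hij => lt_of_lt_of_le htvi (fs_val_mono fs hpair hij hj)
        have hcount_t : (ft.countP (fun f => decide (t < f)) : Int) = (fs.length : Int) - i :=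
          countP_gt ft fs hperm i (by omega) t hlow hhigh
        -- the index both programs use
        have hidx : PySem.Int.mod (k - endtime) ((fs.length : Int) - i) = k - Sv ft t := by
          have hr : (0:Int) < (fs.length : Int) - i := by
            push_cast; omega
          have hub : k - Sv ft t < (fs.length : Int) - i := by
            have := Sv_succ ft t
            omega
          have hdiff : ∃ m : Int, k - endtime = (k - Sv ft t) + m * ((fs.length : Int) - i) := by
            rcases hinv with ⟨hz, rfl⟩ | ⟨h1, hpos, he, hle, _⟩
            · -- endtime = 0, i = 0, S(t) = t * n
              have hall : ∀ f ∈ ft, t ≤ f := by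
                intro f hf
                rcases mem_ft_val ft fs hperm hf with ⟨j, hj, rfl⟩
                exact le_of_lt (hhigh j hj (by omega))
              refine ⟨t, ?_⟩
              have hlen : fs.length = ft.length := by
                simpa [PySem.List.length_enumerate] using hperm.length_eq
              rw [Sv_all_ge ft t hall, ← hlen]
              subst hz; push_cast; ring
            · -- endtime = S(prev), S(t) = S(prev) + (t - prev) * r
              refine ⟨t - (fs[i-1]'h1).2, ?_⟩
              have hcount : ∀ x, (fs[i-1]'h1).2 ≤ x → x < t →
                  (ft.countP (fun f => decide (x < f)) : Int) = (fs.length : Int) - i := by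
                intro x hx1 hx2
                refine countP_gt ft fs hperm i (by omega) x ?_ ?_
                · intro j hj
                  exact le_trans (fs_val_mono fs hpair (by omega) h1) hx1
                · intro j hj hij
                  exact lt_of_lt_of_le hx2 (le_of_lt (hhigh j hj hij))
              rw [he, Sv_lin ft _ _ _ hle hcount]
              ring
          rcases hdiff with ⟨m, hm⟩
          rw [PySem.Int.mod_eq_emod_of_pos hr, hm, Int.add_mul_emod_self_right,
            Int.emod_eq_of_lt (by omega) hub]
        rw [hidx]
        -- the remaining-foods list both programs read
        have hfilter : fs.filter (fun e => decide (t < e.2)) = fs.drop i :=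
          filter_val_eq_drop fs i (by omega) t hlow hhigh
        have hpan : PySem.List.sorted ((fs.map (fun p => (p.1 + 1, p.2))).drop i) (fun x => x.1) false
            = ((PySem.List.enumerate ft 0).filter (fun e => decide (t < e.2))).map
                (fun e => (e.1 + 1, e.2)) := by
          apply PySem.List.sorted_eq_of_perm_of_pairwise_lt
          · rw [← List.map_drop, ← hfilter]
            exact ((hperm.symm.filter _).map _)
          · rw [List.pairwise_map]
            refine (List.Pairwise.sublist (List.filter_sublist)
              (PySem.List.pairwise_lt_enumerate ft 0)).imp ?_
            intro a b h'; simpa using h'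
        rw [hpan, BAns,
          filterMap_if_eq_filter_map (PySem.List.enumerate ft 0) (fun p => t < p.2) (fun p => p.1 + 1),
          pyGet?_map, pyGet?_map]
        cases PySem.List.pyGet? ((PySem.List.enumerate ft 0).filter (fun e => decide (t < e.2)))
            (k - Sv ft t) with
        | none => rfl
        | some e => rfl
      · rw [if_neg hk]
        have hstep : ((fs.length : Int) - i) - 1 = (fs.length : Int) - ((i + 1 : Nat) : Int) := by
          push_cast; ring
        rw [hstep]
        refine ih (i + 1) _ (by omega) (by omega) (Or.inr ⟨by simpa using hi, by omega, ?_, ?_, not_lt.mp hk⟩)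
        · simpa using rfl
        · -- v_i ≤ t, else S(t+1) ≤ S(v_i) ≤ k contradicts ht2
          simp only [Nat.add_sub_cancel]
          by_contra hc
          have : Sv ft (t + 1) ≤ Sv ft ((fs[i]'hi).2) := Sv_mono ft (by omega)
          omega
    · exfalso
      -- same dead-end as fuel = 0: the loop cannot legitimately reach i = fs.length
      have hi' : i = fs.length := by omega
      rcases hinv with ⟨rfl, _⟩ | ⟨h1, hpos, he, hle, hek⟩
      · have hft : ft = [] := by
          have := hperm.length_eq
          rw [PySem.List.length_enumerate] at this
          exact List.length_eq_zero_iff.mp (by omega)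
        subst hft
        simp [Sv] at ht1 ht2
        omega
      · have hmax : ∀ f ∈ ft, f ≤ (fs[i-1]'h1).2 := by
          intro f hf
          rcases mem_ft_val ft fs hperm hf with ⟨j, hj, rfl⟩
          exact fs_val_mono fs hpair (by omega) h1
        have hsum : Sv ft ((fs[i-1]'h1).2) = ft.sum := Sv_all_le ft _ hmax
        have h2 : Sv ft (t + 1) ≤ ft.sum := Sv_le_sum ft (t + 1)
        omega

-- when k is at least the total eating time, A's loop runs to completion and returns -1
theorem A_loop_none (ft : List Int) (k : Int) (fs : List (Int × Int))
    (hperm : fs.Perm (PySem.List.enumerate ft 0))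
    (hpair : fs.Pairwise (fun p q => p.2 < q.2 ∨ (p.2 = q.2 ∧ p.1 < q.1)))
    (hk : ft.sum ≤ k) :
    ∀ (i : Nat) (endtime : Int), i ≤ fs.length →
      ((i = 0 ∧ endtime = 0) ∨
        (∃ h : i - 1 < fs.length, 0 < i ∧ endtime = Sv ft ((fs[i-1]'h).2))) →
      solutionLoop (fs.map (fun p => (p.1 + 1, p.2))) k i ((fs.length : Int) - i) endtime
        = -1 := by
  suffices main : ∀ (fuel i : Nat) (endtime : Int), fs.length - i ≤ fuel → i ≤ fs.length →
      ((i = 0 ∧ endtime = 0) ∨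
        (∃ h : i - 1 < fs.length, 0 < i ∧ endtime = Sv ft ((fs[i-1]'h).2))) →
      solutionLoop (fs.map (fun p => (p.1 + 1, p.2))) k i ((fs.length : Int) - i) endtime = -1 by
    intro i endtime h1 h2
    exact main (fs.length - i) i endtime le_rfl h1 h2
  intro fuel
  induction fuel with
  | zero =>
    intro i endtime hfuel hile _
    have hi : ¬ i < fs.length := by omega
    rw [solutionLoop]
    simp [hi]
  | succ fuel ih =>
    intro i endtime hfuel hile hinv
    by_cases hi : i < fs.length
    · rw [solutionLoop]
      rw [dif_pos (by simpa using hi)]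
      simp only [List.getElem_map, List.length_map]
      have htmp := tmp_eq ft k fs hperm hpair i hi endtime hinv
      rw [show (if i = 0 then endtime + (fs[i]'hi).2 * ((fs.length : Int) - (i:Int))
          else endtime + ((fs[i]'hi).2 - ((fs[i-1]'(by omega)).2)) * ((fs.length : Int) - (i:Int)))
          = Sv ft ((fs[i]'hi).2) from htmp]
      rw [if_neg (by exact not_lt.mpr (le_trans (Sv_le_sum ft _) hk))]
      have hstep : ((fs.length : Int) - i) - 1 = (fs.length : Int) - ((i + 1 : Nat) : Int) := by
        push_cast; ring
      rw [hstep]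
      refine ih (i + 1) _ (by omega) (by omega) (Or.inr ⟨by simpa using hi, by omega, ?_⟩)
      simpa using rfl
    · rw [solutionLoop]
      simp [hi]

-- ===== VERDICT (by name: the statement is the Claim_ definition above) =====
theorem solution_spec : Claim_equal_solution := by
  intro ft k _
  show solution ft k = solution_alt ft k
  have hpairlt := PySem.List.pairwise_lt_enumerate ft 0
  have hperm : (PySem.List.sorted (PySem.List.enumerate ft 0) (fun x => x.2) false).Perm
      (PySem.List.enumerate ft 0) := PySem.List.sorted_perm _ _ _
  have hpair := sorted_snd_stable _ hpairlt
  have hlenfs : (PySem.List.sorted (PySem.List.enumerate ft 0) (fun x => x.2) false).length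
      = ft.length := by
    simpa [PySem.List.length_enumerate] using hperm.length_eq
  have hA : solution ft k = solutionLoop
      ((PySem.List.sorted (PySem.List.enumerate ft 0) (fun x => x.2) false).map
        (fun p => (p.1 + 1, p.2))) k 0
      (((PySem.List.sorted (PySem.List.enumerate ft 0) (fun x => x.2) false).length : Int) - (0:Nat)) 0 := by
    show solution ft k = solutionLoop _ k 0 _ 0
    rw [hlenfs]
    norm_num [solution]
  by_cases hnil : ft.length = 0
  · have hft : ft = [] := List.length_eq_zero_iff.mp hnil
    subst hft
    rw [hA, solutionLoop]
    norm_num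
    rfl
  · by_cases htot : ft.sum ≤ k
    · rw [hA, A_loop_none ft k _ hperm hpair htot 0 0 (Nat.zero_le _) (Or.inl ⟨rfl, rfl⟩)]
      show (-1 : Int) = solution_alt ft k
      unfold solution_alt
      rw [if_neg hnil, if_pos htot]
    · -- the interesting branch: k below the total time
      obtain ⟨mn, hmn⟩ : ∃ mn, PySem.List.min? ft (fun x => x) = some mn := by
        cases h : PySem.List.min? ft (fun x => x) with
        | none => exact absurd (List.length_eq_zero_iff.mpr
            ((PySem.List.min?_eq_none_iff _ _).mp h)) hnil
        | some m => exact ⟨m, rfl⟩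
      obtain ⟨mx, hmx⟩ : ∃ mx, PySem.List.max? ft (fun x => x) = some mx := by
        cases h : PySem.List.max? ft (fun x => x) with
        | none => exact absurd (List.length_eq_zero_iff.mpr
            ((PySem.List.max?_eq_none_iff _ _).mp h)) hnil
        | some m => exact ⟨m, rfl⟩
      have hmin : ∀ y ∈ ft, mn ≤ y := fun y hy => PySem.List.min?_isMin hmn y hy
      have hmaxv : ∀ y ∈ ft, y ≤ mx := fun y hy => PySem.List.max?_isMax hmx y hy
      have hmnmem : mn ∈ ft := PySem.List.min?_mem hmn
      have hnI : (0:Int) < (ft.length : Int) := by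
        have : 0 < ft.length := Nat.pos_of_ne_zero hnil
        exact_mod_cast this
      have hSlo : Sv ft (min (mn - 1) (PySem.Int.floordiv k (ft.length : Int))) ≤ k := by
        have hall : ∀ f ∈ ft, min (mn - 1) (PySem.Int.floordiv k (ft.length : Int)) ≤ f := by
          intro f hf
          have h1 := hmin f hf
          have h2 : min (mn - 1) (PySem.Int.floordiv k (ft.length : Int)) ≤ mn - 1 :=
            min_le_left _ _
          omega
        rw [Sv_all_ge ft _ hall]
        have h1 := PySem.Int.floordiv_mul_add_mod k ((ft.length : Int))
        have h2 := PySem.Int.mod_nonneg (a := k) hnI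
        have h3 : min (mn - 1) (PySem.Int.floordiv k (ft.length : Int))
            ≤ PySem.Int.floordiv k (ft.length : Int) := min_le_right _ _
        nlinarith
      have hSmx : k < Sv ft mx := by
        rw [Sv_all_le ft mx hmaxv]
        omega
      have hlomx : min (mn - 1) (PySem.Int.floordiv k (ft.length : Int)) < mx := by
        have h1 := hmaxv mn hmnmem
        have h2 : min (mn - 1) (PySem.Int.floordiv k (ft.length : Int)) ≤ mn - 1 :=
          min_le_left _ _
        omega
      obtain ⟨ht1, ht2⟩ := bsearch_spec ft k
        ((mx - min (mn - 1) (PySem.Int.floordiv k (ft.length : Int))).toNat) _ mx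
        le_rfl hlomx hSlo hSmx
      have hB : solution_alt ft k = BAns ft k
          (bsearchLoop ft k (min (mn - 1) (PySem.Int.floordiv k (ft.length : Int))) mx) := by
        unfold solution_alt
        rw [if_neg hnil]
        simp only [hmn, hmx, if_neg htot]
        rfl
      rw [hA, hB]
      exact A_loop_eq ft k _ hperm hpair _ ht1 ht2 0 0 (Nat.zero_le _) (Or.inl ⟨rfl, rfl⟩)
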